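-- pv_equiv track=rewrite | github.com/pranavacharya/distributedCompute | Assign_jobs_sequentially.py | assign_jobs_sequentially
-- ===== SOURCE A (Python) =====
-- def assign_jobs_sequentially(client_status, job_parts):
--     list_of_clients=[k for k,v in client_status.items() if v ==1]
--     len_client=len(list_of_clients)
--     len_job=len(job_parts)
--     max_len=max(len_client,len_job)
--     assign_list = [[] for x in range(len_client)]
--     n_j=0
--     for i in range(max_len):
--         for j in range(len_client):
--             if n_j==len_job:
--                 break
--             assign_list[j].append(job_parts[n_j])
--             n_j=n_j+1
--         if n_j==len_job:
--             break
--     assign_jobs={}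
--     for i in range(len(list_of_clients)):
--         assign_jobs[list_of_clients[i]]=assign_list[i]
--     return assign_jobs
-- ===== SOURCE B (Python) =====
-- def assign_jobs_sequentially(client_status, job_parts):
--     actives = [k for k, v in client_status.items() if v == 1]
--     assign_jobs = {c: [] for c in actives}
--     if not actives:
--         return assign_jobs
--     L = len(actives)
--     for n, job in enumerate(job_parts):
--         assign_jobs[actives[n % L]].append(job)
--     return assign_jobs
-- ===== Notes on version B (the rewrite author's own statement) =====
-- stated objective: simpler
-- what changed: Replaces A's nested max_len-by-len_client loop with break flags, a separate assign_list of per-client lists, and a final dict-assembly pass by a single enumerate pass that appends each job directly to assign_jobs[actives[n % len(actives)]], guarding the no-active-clients case up front.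
import Mathlib
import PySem

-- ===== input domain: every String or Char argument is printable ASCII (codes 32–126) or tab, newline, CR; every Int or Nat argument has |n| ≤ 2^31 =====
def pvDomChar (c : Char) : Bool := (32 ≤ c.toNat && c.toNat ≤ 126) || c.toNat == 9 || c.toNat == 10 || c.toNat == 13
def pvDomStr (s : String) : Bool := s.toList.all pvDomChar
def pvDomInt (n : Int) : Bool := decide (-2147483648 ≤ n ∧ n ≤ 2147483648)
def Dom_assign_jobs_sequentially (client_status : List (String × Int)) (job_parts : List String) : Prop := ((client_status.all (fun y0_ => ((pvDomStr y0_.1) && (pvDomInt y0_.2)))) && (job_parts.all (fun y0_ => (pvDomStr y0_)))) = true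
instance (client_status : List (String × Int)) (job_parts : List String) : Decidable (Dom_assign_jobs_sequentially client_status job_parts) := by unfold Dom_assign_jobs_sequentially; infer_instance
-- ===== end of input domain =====

-- B replaces A's nested max_len × len_client loop with breaks by one enumerate pass using n % len(actives) (objective: simpler).

-- ===== PORT A =====
-- assign_list[j].append(job_parts[n_j]); in A both indices are always in range, so getD is exact
def ajsAppend (al : List (List String)) (j : Nat) (x : String) : List (List String) :=
  al.set j (al.getD j [] ++ [x])

-- inner 'for j in range(len_client)' loop with its break; state (assign_list, n_j)
def ajsInner (job_parts : List String) (len_job : Nat) :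
    List Nat → List (List String) → Nat → List (List String) × Nat
  | [], al, nj => (al, nj)
  | j :: js, al, nj =>
    if nj == len_job then (al, nj)                    -- break
    else ajsInner job_parts len_job js (ajsAppend al j (job_parts.getD nj "")) (nj + 1)

-- outer 'for i in range(max_len)' loop with its break
def ajsOuter (job_parts : List String) (len_job len_client : Nat) :
    Nat → List (List String) → Nat → List (List String)
  | 0, al, _ => al
  | t + 1, al, nj =>
    let r := ajsInner job_parts len_job (List.range len_client) al nj
    if r.2 == len_job then r.1                         -- break
    else ajsOuter job_parts len_job len_client t r.1 r.2

def assign_jobs_sequentially (client_status : List (String × Int)) (job_parts : List String) :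
    List (String × List String) :=
  let list_of_clients := (client_status.filter (fun kv => kv.2 == 1)).map Prod.fst
  let len_client := list_of_clients.length
  let len_job := job_parts.length
  let max_len := max len_client len_job
  let assign_list := List.replicate len_client ([] : List String)
  let al := ajsOuter job_parts len_job len_client max_len assign_list 0
  ((List.range len_client).foldl
    (fun d i => d.insert (list_of_clients.getD i "") (al.getD i [])) PySem.Dict.empty).items

-- ===== PORT B =====
def assign_jobs_sequentially_alt (client_status : List (String × Int)) (job_parts : List String) :
    List (String × List String) :=
  let actives := (client_status.filter (fun kv => kv.2 == 1)).map Prod.fst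
  let base := actives.foldl (fun d c => d.insert c ([] : List String)) PySem.Dict.empty
  if actives.isEmpty then base.items
  else
    ((PySem.List.enumerate job_parts).foldl
      (fun d p =>
        d.modify (PySem.List.pyGetD actives (PySem.Int.mod p.1 (actives.length : Int)) "") []
          (fun l => l ++ [p.2])) base).items

-- ===== PRECONDITION & SPEC =====
-- Pre_ excludes association lists with duplicate keys: they cannot arise from a Python dict
-- argument, and on them A's last-insert-wins dict rebuild and B's shared-key appends disagree.
def Pre_assign_jobs_sequentially (client_status : List (String × Int)) (job_parts : List String) : Prop :=
  (client_status.map Prod.fst).Nodup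
instance (client_status : List (String × Int)) (job_parts : List String) : Decidable (Pre_assign_jobs_sequentially client_status job_parts) := by unfold Pre_assign_jobs_sequentially; infer_instance

def pvWitness_assign_jobs_sequentially : (List (String × Int)) × List String :=
  ([("a", 1), ("b", 0), ("c", 1)], ["j1", "j2", "j3"])

def Spec_assign_jobs_sequentially (client_status : List (String × Int)) (job_parts : List String) (out : List (String × List String)) : Prop := out = assign_jobs_sequentially_alt client_status job_parts
instance (client_status : List (String × Int)) (job_parts : List String) (out : List (String × List String)) : Decidable (Spec_assign_jobs_sequentially client_status job_parts out) := by unfold Spec_assign_jobs_sequentially; infer_instance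

-- ===== CLAIM (what is proved, stated in full; the proofs are below) =====
def Claim_equal_assign_jobs_sequentially : Prop := ∀ (client_status : List (String × Int)) (job_parts : List String), Dom_assign_jobs_sequentially client_status job_parts → Pre_assign_jobs_sequentially client_status job_parts → Spec_assign_jobs_sequentially client_status job_parts (assign_jobs_sequentially client_status job_parts)

-- ===== LEMMAS AND PROOFS =====

lemma filter_range_eq (c i : Nat) :
    (List.range c).filter (fun r => r == i) = if i < c then [i] else [] := by
  induction c with
  | zero => simp
  | succ c ih =>
    rw [List.range_succ, List.filter_append, ih]
    by_cases h : i < c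
    · simp [h, Nat.lt_succ_of_lt h, Nat.ne_of_gt h]
    · by_cases h2 : i = c
      · simp [h, h2]
      · have : ¬ i < c + 1 := by omega
        simp [h, this, Ne.symm h2, h2]

lemma map_getD_range {α : Type} (xs : List α) (d : α) :
    (List.range xs.length).map (fun j => xs.getD j d) = xs := by
  apply List.ext_getElem
  · simp
  · intro i h1 h2
    simp [List.getElem?_eq_getElem h2]

lemma filter_range'_mod (L s c i : Nat) (hs : L ∣ s) (hc : c ≤ L) :
    (List.range' s c).filter (fun n => n % L == i) = if i < c then [s + i] else [] := by
  have hr : List.range' s c = (List.range c).map (fun r => s + r) := by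
    rw [List.range'_eq_map_range]
  rw [hr, List.filter_map]
  have hcong : ((fun n => n % L == i) ∘ (fun r => s + r)) = fun r => (s + r) % L == i := rfl
  have : (List.range c).filter ((fun n => n % L == i) ∘ (fun r => s + r)) =
      (List.range c).filter (fun r => r == i) := by
    apply List.filter_congr
    intro r hr'
    have hrc : r < c := List.mem_range.mp hr'
    obtain ⟨q, hq⟩ := hs
    have : (s + r) % L = r := by
      subst hq
      rw [Nat.add_comm, Nat.add_mul_mod_self_left]
      exact Nat.mod_eq_of_lt (by omega)
    simp [this]
  rw [this, filter_range_eq]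
  by_cases h : i < c <;> simp [h]

lemma ajsInner_len (jp : List String) (N : Nat) :
    ∀ (js : List Nat) (al : List (List String)) (nj : Nat),
      (ajsInner jp N js al nj).1.length = al.length := by
  intro js
  induction js with
  | nil => intro al nj; simp [ajsInner]
  | cons j js ih =>
    intro al nj
    rw [ajsInner]
    by_cases h : (nj == N) = true
    · simp [h]
    · have h' : (nj == N) = false := by simpa using h
      rw [h']
      simp only [Bool.false_eq_true, if_false]
      rw [ih]
      simp [ajsAppend]

lemma ajsInner_snd (jp : List String) (N : Nat) :
    ∀ (m j₀ : Nat) (al : List (List String)) (s : Nat), s ≤ N →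
      (ajsInner jp N (List.range' j₀ m) al s).2 = s + min m (N - s) := by
  intro m
  induction m with
  | zero => intro j₀ al s hs; simp [ajsInner]
  | succ m ih =>
    intro j₀ al s hs
    rw [List.range'_succ, ajsInner]
    by_cases h : s = N
    · subst h; simp
    · have hne : (s == N) = false := by simp; omega
      rw [hne]
      simp only [Bool.false_eq_true, if_false]
      rw [ih (j₀+1) _ (s+1) (by omega)]
      omega

lemma ajsInner_getD (jp : List String) (N : Nat) :
    ∀ (m j₀ : Nat) (al : List (List String)) (s i : Nat), s ≤ N →
      (ajsInner jp N (List.range' j₀ m) al s).1.getD i [] =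
        al.getD i [] ++
          (if j₀ ≤ i ∧ i < j₀ + m ∧ s + (i - j₀) < N ∧ i < al.length
           then [jp.getD (s + (i - j₀)) ""] else []) := by
  intro m
  induction m with
  | zero =>
    intro j₀ al s i hs
    have hc : ¬ (j₀ ≤ i ∧ i < j₀ + 0 ∧ s + (i - j₀) < N ∧ i < al.length) := by omega
    rw [if_neg hc]
    simp [ajsInner]
  | succ m ih =>
    intro j₀ al s i hs
    rw [List.range'_succ, ajsInner]
    by_cases h : s = N
    · subst h
      have hc : ¬ (j₀ ≤ i ∧ i < j₀ + (m+1) ∧ s + (i - j₀) < s ∧ i < al.length) := by omega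
      rw [if_neg hc]
      simp
    · have hne : (s == N) = false := by simp; omega
      rw [hne]
      simp only [Bool.false_eq_true, if_false]
      rw [ih (j₀+1) _ (s+1) i (by omega)]
      have hlen : (ajsAppend al j₀ (jp.getD s "")).length = al.length := by
        simp [ajsAppend]
      rw [hlen]
      by_cases hij : i = j₀
      · subst hij
        by_cases hil : i < al.length
        · have h1 : (ajsAppend al i (jp.getD s "")).getD i [] = al.getD i [] ++ [jp.getD s ""] := by
            simp [ajsAppend, List.getD, List.getElem?_set, hil]
          rw [h1]
          have c2 : ¬ (i + 1 ≤ i ∧ i < i + 1 + m ∧ s + 1 + (i - (i+1)) < N ∧ i < al.length) := by omega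
          have c1 : (i ≤ i ∧ i < i + (m+1) ∧ s + (i - i) < N ∧ i < al.length) :=
            ⟨le_refl _, by omega, by omega, hil⟩
          rw [if_neg c2, if_pos c1]
          simp
        · have h1 : (ajsAppend al i (jp.getD s "")).getD i [] = al.getD i [] := by
            simp [ajsAppend, List.getD, List.getElem?_set, hil]
          rw [h1]
          have c2 : ¬ (i + 1 ≤ i ∧ i < i + 1 + m ∧ s + 1 + (i - (i+1)) < N ∧ i < al.length) := by omega
          have c1 : ¬ (i ≤ i ∧ i < i + (m+1) ∧ s + (i - i) < N ∧ i < al.length) := by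
            intro hx; exact hil hx.2.2.2
          rw [if_neg c2, if_neg c1]
      · have h1 : (ajsAppend al j₀ (jp.getD s "")).getD i [] = al.getD i [] := by
          simp [ajsAppend, List.getD, List.getElem?_set, Ne.symm hij]
        rw [h1]
        by_cases c : j₀ + 1 ≤ i ∧ i < j₀ + 1 + m ∧ s + 1 + (i - (j₀+1)) < N ∧ i < al.length
        · have c' : j₀ ≤ i ∧ i < j₀ + (m+1) ∧ s + (i - j₀) < N ∧ i < al.length := by omega
          have he : s + 1 + (i - (j₀+1)) = s + (i - j₀) := by omega
          rw [if_pos c, if_pos c', he]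
        · have c' : ¬ (j₀ ≤ i ∧ i < j₀ + (m+1) ∧ s + (i - j₀) < N ∧ i < al.length) := by
            intro hc; apply c; omega
          rw [if_neg c, if_neg c']

lemma ajsOuter_getD (jp : List String) (N L : Nat) (hL : 0 < L) :
    ∀ (t : Nat) (al : List (List String)) (s i : Nat),
      al.length = L → s ≤ N → L ∣ s → N ≤ s + t * L →
      (ajsOuter jp N L t al s).getD i [] =
        al.getD i [] ++
          ((List.range' s (N - s)).filter (fun n => n % L == i)).map (fun n => jp.getD n "") := by
  intro t
  induction t with
  | zero =>
    intro al s i hal hs hdvd ht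
    have hsN : s = N := by omega
    subst hsN
    simp [ajsOuter]
  | succ t ih =>
    intro al s i hal hs hdvd ht
    rw [ajsOuter]
    have hrange : List.range L = List.range' 0 L := List.range_eq_range'
    have hsnd : (ajsInner jp N (List.range L) al s).2 = s + min L (N - s) := by
      rw [hrange]; exact ajsInner_snd jp N L 0 al s hs
    have hget : ∀ i', (ajsInner jp N (List.range L) al s).1.getD i' [] =
        al.getD i' [] ++
          (if i' < L ∧ s + i' < N then [jp.getD (s + i') ""] else []) := by
      intro i'
      rw [hrange, ajsInner_getD jp N L 0 al s i' hs]
      congr 1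
      have : (0 ≤ i' ∧ i' < 0 + L ∧ s + (i' - 0) < N ∧ i' < al.length) ↔ (i' < L ∧ s + i' < N) := by
        omega
      by_cases hc : i' < L ∧ s + i' < N
      · rw [if_pos (this.mpr hc), if_pos hc]; simp
      · rw [if_neg (fun h => hc (this.mp h)), if_neg hc]
    have hlen : (ajsInner jp N (List.range L) al s).1.length = L := by
      rw [ajsInner_len]; exact hal
    by_cases hbrk : s + min L (N - s) = N
    · -- break: N ≤ s + L
      have : ((ajsInner jp N (List.range L) al s).2 == N) = true := by simp [hsnd, hbrk]
      simp only [this, if_true]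
      rw [hget i]
      have hNsL : N - s ≤ L := by omega
      rw [filter_range'_mod L s (N - s) i hdvd hNsL]
      by_cases hc : i < N - s
      · have : i < L ∧ s + i < N := by omega
        rw [if_pos hc, if_pos this]
        simp [hal]  -- needs i < al.length? condition already used
      · have : ¬ (i < L ∧ s + i < N) := by omega
        rw [if_neg hc, if_neg this]
        simp
    · -- no break: s + L < N (since min = L and s+L ≠ N)
      have hmin : min L (N - s) = L := by omega
      have hsL : s + L < N := by omega
      have : ((ajsInner jp N (List.range L) al s).2 == N) = false := by
        simp [hsnd, hbrk]
      rw [this]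
      simp only [Bool.false_eq_true, if_false]
      rw [hsnd, hmin]
      have hexp : (t + 1) * L = t * L + L := by ring
      rw [ih _ (s + L) i hlen (by omega) (dvd_add hdvd (dvd_refl L)) (by omega)]
      rw [hget i]
      have hsplit : List.range' s (N - s) = List.range' s L ++ List.range' (s + L) (N - (s + L)) := by
        have h : List.range' s L ++ List.range' (s + 1 * L) (N - (s + L)) =
            List.range' s (L + (N - (s + L))) := List.range'_append
        rw [one_mul] at h
        rw [show N - s = L + (N - (s + L)) from by omega, ← h]
      rw [hsplit, List.filter_append, List.map_append]
      rw [filter_range'_mod L s L i hdvd (le_refl L)]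
      by_cases hc : i < L
      · have : i < L ∧ s + i < N := ⟨hc, by omega⟩
        rw [if_pos hc, if_pos this]
        simp
      · have : ¬ (i < L ∧ s + i < N) := by omega
        rw [if_neg hc, if_neg this]
        simp

lemma ajsOuter_value (jp : List String) (L : Nat) (hL : 0 < L) (i : Nat) :
    (ajsOuter jp jp.length L (max L jp.length) (List.replicate L []) 0).getD i [] =
      ((List.range jp.length).filter (fun n => n % L == i)).map (fun n => jp.getD n "") := by
  have h := ajsOuter_getD jp jp.length L hL (max L jp.length) (List.replicate L []) 0 i
    (by simp) (Nat.zero_le _) (dvd_zero L)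
    (by
      have h1 : jp.length ≤ max L jp.length * L :=
        le_trans (Nat.le_mul_of_pos_right jp.length hL)
          (Nat.mul_le_mul_right L (le_max_right L jp.length))
      omega)
  rw [h]
  have hrep : (List.replicate L ([] : List String)).getD i [] = [] := by
    rw [List.getD, List.getElem?_replicate]
    split <;> rfl
  rw [hrep, List.nil_append, Nat.sub_zero, ← List.range_eq_range']

lemma ajs_main (client_status : List (String × Int)) (job_parts : List String)
    (hpre : (client_status.map Prod.fst).Nodup) :
    assign_jobs_sequentially client_status job_parts =
      assign_jobs_sequentially_alt client_status job_parts := by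
  have hnd : ((client_status.filter (fun kv => kv.2 == 1)).map Prod.fst).Nodup :=
    hpre.sublist (List.Sublist.map Prod.fst List.filter_sublist)
  set actives := (client_status.filter (fun kv => kv.2 == 1)).map Prod.fst with hact
  set L := actives.length with hLdefL
  set N := job_parts.length with hNdef
  by_cases hA : actives = []
  · -- no active clients
    simp only [assign_jobs_sequentially, assign_jobs_sequentially_alt, ← hact, hA]
    simp [PySem.Dict.empty]
  · have hL : 0 < L := by
      rw [hLdefL]; exact List.length_pos_iff.mpr hA
    have hEmp : actives.isEmpty = false := by simp [hA]
    set al := ajsOuter job_parts N L (max L N) (List.replicate L []) 0 with hal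
    -- A side items
    have h2 : ((List.range L).map (fun i => actives.getD i "")).Nodup := by
      rw [hLdefL, map_getD_range actives ""]; exact hnd
    have hAitems :
        ((List.range L).foldl
          (fun d i => d.insert (actives.getD i "") (al.getD i [])) PySem.Dict.empty).items =
          (List.range L).map (fun i => (actives.getD i "", al.getD i [])) := by
      have := PySem.Dict.items_foldl_insert_fresh (List.range L)
        (fun i => actives.getD i "") (fun i => al.getD i []) PySem.Dict.empty
        (fun a _ => PySem.Dict.contains_empty _) h2
      simpa using this
    -- B side
    set base := actives.foldl (fun d c => d.insert c ([] : List String)) PySem.Dict.empty with hbase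
    have hbitems : base.items = actives.map (fun c => (c, ([] : List String))) := by
      have := PySem.Dict.items_foldl_insert_fresh actives (fun c => c) (fun _ => ([] : List String))
        PySem.Dict.empty (fun a _ => PySem.Dict.contains_empty _) (by simpa using hnd)
      simpa using this
    have hbkeys : base.keys = actives := by
      rw [hbase]
      have := PySem.Dict.keys_foldl_insert actives (fun _ _ => ([] : List String)) PySem.Dict.empty
      simp only [PySem.Dict.keys_empty, PySem.Set.update_nil_left] at this
      rw [this, PySem.Set.ofList_eq_self_of_nodup actives hnd]
    have henum : PySem.List.enumerate job_parts =
        (List.range N).map (fun k : Nat => ((k : Int), job_parts.getD k "")) := by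
      rw [hNdef, PySem.List.enumerate_eq_map_pyRange job_parts "", PySem.List.pyRange_one]
      simp [PySem.List.len_eq, List.map_map, Function.comp, PySem.List.pyGetD_natCast]
    set q : Nat → String × String :=
      fun k => (actives.getD (k % L) "", job_parts.getD k "") with hq
    set Bd := (PySem.List.enumerate job_parts).foldl
      (fun d p =>
        d.modify (PySem.List.pyGetD actives (PySem.Int.mod p.1 (L : Int)) "") []
          (fun l => l ++ [p.2])) base with hBd
    have hfold : Bd = ((List.range N).map q).foldl
        (fun d p => d.modify p.1 [] (fun l => l ++ [p.2])) base := by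
      rw [hBd, henum, List.foldl_map, List.foldl_map]
      congr 1
      funext d k
      have h1 : PySem.Int.mod (k : Int) (L : Int) = ((k % L : Nat) : Int) :=
        PySem.Int.mod_natCast k L
      rw [hq]
      simp only [h1, PySem.List.pyGetD_natCast]
    have hBkeys : Bd.keys = actives := by
      rw [hfold]
      have := PySem.Dict.keys_foldl_modify_key ((List.range N).map q) Prod.fst ([] : List String)
        (fun _ p => fun l => l ++ [p.2]) base
      rw [this, hbkeys, PySem.Set.update_eq_append_filter]
      have hnil : (PySem.Set.ofList (((List.range N).map q).map Prod.fst)).filter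
          (fun y => !PySem.Set.contains actives y) = [] := by
        apply List.filter_eq_nil_iff.mpr
        intro y hy
        have hy2 : y ∈ ((List.range N).map q).map Prod.fst := (PySem.Set.mem_ofList _ _).mp hy
        simp only [List.map_map, List.mem_map, List.mem_range] at hy2
        obtain ⟨k, hk, hyk⟩ := hy2
        have hkL : k % L < L := Nat.mod_lt _ hL
        have hmem : y ∈ actives := by
          rw [← hyk, hq]
          simp only [Function.comp]
          rw [List.getD_eq_getElem actives "" hkL]
          exact List.getElem_mem _
        unfold PySem.Set.contains
        simpa using hmem
      rw [hnil, List.append_nil]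
    have hBnodup : Bd.keys.Nodup := by rw [hBkeys]; exact hnd
    have hBitems : Bd.items = actives.map (fun c => (c, Bd.getD c [])) := by
      rw [PySem.Dict.items_eq_map_keys Bd hBnodup [], hBkeys]
    -- per index equality
    have hper : ∀ i, i < L → Bd.getD (actives.getD i "") [] = al.getD i [] := by
      intro i hi
      have hbgetD : base.getD (actives.getD i "") [] = [] := by
        apply PySem.Dict.getD_of_mem_items base _ (by rw [hbkeys]; exact hnd)
        rw [hbitems]
        exact List.mem_map_of_mem (by rw [List.getD_eq_getElem actives "" hi]; exact List.getElem_mem _)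
      rw [hfold, PySem.Dict.getD_foldl_modify_append, hbgetD, List.nil_append]
      rw [List.filter_map, List.map_map]
      have hfc : (List.range N).filter ((fun p => p.1 == actives.getD i "") ∘ q) =
          (List.range N).filter (fun k => k % L == i) := by
        apply List.filter_congr
        intro k hk
        have hkL : k % L < L := Nat.mod_lt _ hL
        simp only [Function.comp, hq]
        rw [List.getD_eq_getElem actives "" hkL, List.getD_eq_getElem actives "" hi]
        by_cases hx : k % L = i
        · simp [hx]
        · have : actives[k % L] ≠ actives[i] := by
            intro hcon
            exact hx ((hnd.getElem_inj_iff).mp hcon)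
          simp [this, hx]
      rw [hfc, hal]
      have := ajsOuter_value job_parts L hL i
      rw [← hNdef] at this
      rw [this]
      simp [hq, Function.comp]
    -- assemble
    show ((List.range L).foldl
          (fun d i => d.insert (actives.getD i "") (al.getD i [])) PySem.Dict.empty).items =
        assign_jobs_sequentially_alt client_status job_parts
    have hRhs : assign_jobs_sequentially_alt client_status job_parts = Bd.items := by
      show (if actives.isEmpty then base.items else Bd.items) = Bd.items
      rw [hEmp]
      simp
    rw [hAitems, hRhs, hBitems]
    conv_rhs => rw [← map_getD_range actives "", ← hLdefL]
    rw [List.map_map]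
    apply List.map_congr_left
    intro i hi
    have hi' : i < L := List.mem_range.mp hi
    have := hper i hi'
    simp [Function.comp]
    simpa [List.getD] using this.symm

-- ===== VERDICT (by name: the statement is the Claim_ definition above) =====
theorem assign_jobs_sequentially_spec : Claim_equal_assign_jobs_sequentially := by
  intro client_status job_parts _ hpre
  unfold Spec_assign_jobs_sequentially
  exact ajs_main client_status job_parts hpre
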